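/- GENERATED by tools/from_farm_form.py from prooffarm-gif/accepted/DGifGetScreenDesc.3/Lemmas.lean (a worked proof of the farm's unit `DGifGetScreenDesc.3`,
   accepted by the verdict) — do not edit. -/
import Gif.Spec.Units.DGifGetScreenDesc_3
import Gif.Spec.AllSegs

/-!
  Lemmas for the unit `DGifGetScreenDesc.3` (108152H … 1081CCH, dgif_lib.c:272-277, 301, 309; a body segment of a PROTECTED
  function: no contract call, four checked stores into gif).

      sd3_bpp_range        `(Buf[0] & 7) + 1`, as the walker leaves it in `r12`, lies in [1, 8]
      sd3_core_carry       `Core` through a footprint of the own stack (below the body's `rsp`) and the head `[gif, gif + 32)` of gif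
      sd3_flags_stored     the six stores of l.272-276 (three return addresses of check calls, `SColorResolution`,
                           `SBackGroundColor`, `AspectByte`) keep `HeapInv` ∧ `GifOK` ∧ `rem`
      sd3_scm_null_stored  the two stores of l.301 (a return address, `SColorMap = NULL` over a NULL field) keep the three
      sd3_seg              THE WALK: `Body` at 108152H → `AtMake` at 108211H (bit 7 of `Buf[0]` set) or `Exit` at 1080F7H

  The general lemmas are those of Gif/Spec/FrameCarry.lean §5 (`store_gif`, `store_stack`), ForestCarry.lean §3 (`Shape.set_scm`)
  and LzwCarry.lean §1 (`slot_sameExcept`).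
-/

open X86 X86.User Asan ProgX.Base ProgX.Base.Spec Gif.Spec

set_option maxRecDepth 4000
set_option maxHeartbeats 4000000

namespace Gif.Spec.DGifGetScreenDesc_3

/-- **`BitsPerPixel = (Buf[0] & 0x07) + 1` is between 1 and 8** (dgif_lib.c:274; `mov r12d, r13d ; and r12d, 7 ; add r12d, 1`, the
register as the walker leaves it): what `AtMake` says of `r12`. -/
theorem sd3_bpp_range (x : BitVec 32) :
    1 ≤ (Word.ofBV ((x &&& 7#32) + 1#32)).toNat ∧ (Word.ofBV ((x &&& 7#32) + 1#32)).toNat ≤ 8 := by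
  rw [ProgX.toNat_ofBV32, bv32_and7_succ]
  omega

/-- **`Core` through the stores of this segment.** `v` is a state with `Core`, `s` a later state of the segment: the registers that
`Core` names are what they were, the text is unchanged, the ABI's invariant holds, the reader's measure did not grow, and nothing was
written but the function's own stack below the body's stack pointer (the return addresses of the check calls, at `RA − 128`) and
the head of gif `[gif, gif + 32)` (the three flag fields, `SColorMap`). Then `Core` holds of `s` at the address it is at: the saved
registers and the return address lie at or above `RA − 48`, both windows inside the contract's footprint. -/
theorem sd3_core_carry {cut cut' : Word} {H : Heap} {rest : List Obj} {frames : List (Nat × FrameLayout)} {F : Forest} {R : Rd}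
    {u₀ e : State} {ret : Word} {v s : State}
    (hc : DGifGetScreenDesc.Core cut H rest frames F R u₀ e ret v)
    (hrip : s.rip = cut') (hrsp : s.reg .rsp = e.reg .rsp - 120) (hrbx : s.reg .rbx = v.reg .rbx)
    (hrbp : s.reg .rbp = v.reg .rbp)
    (hcode : Mem.EqOn ProgX.Base.L.textLo ProgX.Base.L.textHi u₀.mem s.mem) (habi : (conv u₀).inv s)
    (hg1 : 0x800000 ≤ F.gif) (hg2 : F.gif + 32 ≤ 0xC00000)
    (hs : Mem.SameExcept [⟨(e.reg .rsp).toNat - 400, (e.reg .rsp).toNat - 120⟩, ⟨F.gif, F.gif + 32⟩] v.mem s.mem)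
    (hrem : Gif.Spec.rem R s.mem = Gif.Spec.rem R v.mem) :
    DGifGetScreenDesc.Core cut' H rest frames F R u₀ e ret s := by
  have hroom : 0x700000 + 400 ≤ (e.reg .rsp).toNat := hc.entry.room
  have htop : (e.reg .rsp).toNat + 8 ≤ 0x800000 := hc.entry.top
  -- both windows miss the saved registers and the return-address slot `[RA − 48, RA + 8)`
  have hslots : ∀ a k : Nat, ((e.reg .rsp).toNat - 48 ≤ a ∧ a + k ≤ (e.reg .rsp).toNat + 8) →
      ∀ w, w ∈ [(⟨(e.reg .rsp).toNat - 400, (e.reg .rsp).toNat - 120⟩ : Span), ⟨F.gif, F.gif + 32⟩] →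
        a + k ≤ w.lo ∨ w.hi ≤ a := by
    intro a k hak w hw
    simp only [List.mem_cons, List.not_mem_nil, or_false] at hw
    rcases hw with hw | hw
    · rw [hw]
      simp only
      omega
    · rw [hw]
      simp only
      omega
  -- the footprint since the entry: both windows lie inside the contract's
  have hsameE : Mem.SameExcept
      [⟨(e.reg .rsp).toNat - 400, (e.reg .rsp).toNat⟩,
       shadowSpan ((e.reg .rsp).toNat - 120) ((e.reg .rsp).toNat - 56),
       ⟨0x800000, 0x1000020⟩,
       ⟨R.cur, R.cur + 8⟩] e.mem s.mem := by
    apply Mem.SameExcept.step_same' hc.same hs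
    intro w hw
    simp only [List.mem_cons, List.not_mem_nil, or_false] at hw
    right
    rcases hw with hw | hw
    · rw [hw]
      exact ⟨⟨(e.reg .rsp).toNat - 400, (e.reg .rsp).toNat⟩, by simp only [List.mem_cons, true_or], by simp only; omega,
        by simp only; omega⟩
    · rw [hw]
      exact ⟨⟨0x800000, 0x1000020⟩, by simp only [List.mem_cons, true_or, or_true], by simp only; omega, by simp only; omega⟩
  refine ⟨hc.entry, hc.pre, hrip, hrsp, hrbx.trans hc.rbx, hrbp.trans hc.rbp, ?_, ?_, ?_, ?_, ?_, ?_, ?_, ?_, hsameE,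
    ProgX.Base.conv_code_in hcode, habi⟩
  · exact slot_sameExcept hs (e.reg .rsp) 8 8 _ (by omega) (by omega) hc.slot_r15 (hslots _ _ (by omega))
  · exact slot_sameExcept hs (e.reg .rsp) 16 8 _ (by omega) (by omega) hc.slot_r14 (hslots _ _ (by omega))
  · exact slot_sameExcept hs (e.reg .rsp) 24 8 _ (by omega) (by omega) hc.slot_r13 (hslots _ _ (by omega))
  · exact slot_sameExcept hs (e.reg .rsp) 32 8 _ (by omega) (by omega) hc.slot_r12 (hslots _ _ (by omega))
  · exact slot_sameExcept hs (e.reg .rsp) 40 8 _ (by omega) (by omega) hc.slot_rbp (hslots _ _ (by omega))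
  · exact slot_sameExcept hs (e.reg .rsp) 48 8 _ (by omega) (by omega) hc.slot_rbx (hslots _ _ (by omega))
  · rw [hs.readLE (e.reg .rsp) 8 (by omega) (hslots _ _ (by omega))]
    exact hc.slot_ra
  · rw [hrem]
    exact hc.rem

/-- **The six stores of l.272-276** keep the heap's invariant, the state invariant and the reader's measure: three times the
return address of a check call (at `sp`, in the function's stack below the cursor) and a scalar field of gif
(`SColorResolution` at `g + 8`, `SBackGroundColor` at `g + 12`, `AspectByte` at `g + 16`; `g` = gif, in `rbx`). -/
theorem sd3_flags_stored {H : Heap} {rest : List Obj} {frames : List (Nat × FrameLayout)} {F : Forest} {R : Rd} {top : Nat}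
    {mem : Mem} (hinv : HeapInv H rest frames top mem) (hok : GifOK H F R mem)
    (hcur : 0x700000 ≤ R.cur ∧ R.cur + 16 ≤ 0x800000) (hbase : H.base = 0x800000) (sp g : Word)
    (hsp1 : 0x700000 ≤ sp.toNat) (hsp2 : sp.toNat + 8 ≤ R.cur) (hg : g.toNat = F.gif) (hg2 : F.gif + 32 ≤ 0xC00000)
    (r1 x1 r2 x2 r3 x3 : Nat) :
    HeapInv H rest frames top
      ((((((mem.writeLE sp 8 r1).writeLE (g + 8) 4 x1).writeLE sp 8 r2).writeLE (g + 12) 4 x2).writeLE sp 8 r3).writeLE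
        (g + 16) 1 x3) ∧
    GifOK H F R
      ((((((mem.writeLE sp 8 r1).writeLE (g + 8) 4 x1).writeLE sp 8 r2).writeLE (g + 12) 4 x2).writeLE sp 8 r3).writeLE
        (g + 16) 1 x3) ∧
    Gif.Spec.rem R
      ((((((mem.writeLE sp 8 r1).writeLE (g + 8) 4 x1).writeLE sp 8 r2).writeLE (g + 12) 4 x2).writeLE sp 8 r3).writeLE
        (g + 16) 1 x3) = Gif.Spec.rem R mem := by
  have e8 : (g + 8).toNat = F.gif + 8 := by u_omega
  have e12 : (g + 12).toNat = F.gif + 12 := by u_omega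
  have e16 : (g + 16).toNat = F.gif + 16 := by u_omega
  -- l.272: the check call's return address, then `SColorResolution`
  obtain ⟨hinv1, hok1, hrem1⟩ := store_stack hinv hok hcur sp 8 r1 hsp1 hsp2
  obtain ⟨hinv2, hok2, hrem2⟩ := store_gif hinv1 hok1 hcur hbase (g + 8) 4 x1 (Or.inl (by omega))
  -- l.275: the return address, then `SBackGroundColor`
  obtain ⟨hinv3, hok3, hrem3⟩ := store_stack hinv2 hok2 hcur sp 8 r2 hsp1 hsp2
  obtain ⟨hinv4, hok4, hrem4⟩ := store_gif hinv3 hok3 hcur hbase (g + 12) 4 x2 (Or.inl (by omega))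
  -- l.276: the return address, then `AspectByte`
  obtain ⟨hinv5, hok5, hrem5⟩ := store_stack hinv4 hok4 hcur sp 8 r3 hsp1 hsp2
  obtain ⟨hinv6, hok6, hrem6⟩ := store_gif hinv5 hok5 hcur hbase (g + 16) 1 x3 (Or.inl (by omega))
  refine ⟨hinv6, hok6, ?_⟩
  rw [hrem6, hrem5, hrem4, hrem3, hrem2, hrem1]

/-- **The two stores of l.301** keep the heap's invariant, the state invariant and the reader's measure (`h`: the three, as
`sd3_flags_stored` delivers them): the return address of the check call, and `gif.SColorMap = NULL` (8 bytes at `g + 24`). The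
forest owns no screen colour map (`F.scm = none`: the function's precondition), so the forest after the store is the forest before
it (`Shape.set_scm` with `none`, then `Forest.set_scm_eq`). -/
theorem sd3_scm_null_stored {H : Heap} {rest : List Obj} {frames : List (Nat × FrameLayout)} {F : Forest} {R : Rd} {top : Nat}
    {mem : Mem} {n : Nat}
    (h : HeapInv H rest frames top mem ∧ GifOK H F R mem ∧ Gif.Spec.rem R mem = n)
    (hcur : 0x700000 ≤ R.cur ∧ R.cur + 16 ≤ 0x800000) (hscm : F.scm = none) (sp g : Word)
    (hsp1 : 0x700000 ≤ sp.toNat) (hsp2 : sp.toNat + 8 ≤ R.cur) (hg : g.toNat = F.gif) (hg1 : 0x800000 ≤ F.gif)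
    (hg2 : F.gif + 32 ≤ 0xC00000) (r1 : Nat) :
    HeapInv H rest frames top ((mem.writeLE sp 8 r1).writeLE (g + 24) 8 0) ∧
    GifOK H F R ((mem.writeLE sp 8 r1).writeLE (g + 24) 8 0) ∧
    Gif.Spec.rem R ((mem.writeLE sp 8 r1).writeLE (g + 24) 8 0) = n := by
  obtain ⟨hinv, hok, hrem⟩ := h
  have e24 : (g + 24).toNat = F.gif + 24 := by u_omega
  -- the check call's return address
  obtain ⟨hinv1, hok1, hrem1⟩ := store_stack hinv hok hcur sp 8 r1 hsp1 hsp2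
  -- the store of NULL, as a footprint of one window inside `[gif + 24, gif + 32)`
  have hs : Mem.SameExcept [⟨(g + 24).toNat, (g + 24).toNat + 8⟩] (mem.writeLE sp 8 r1)
      ((mem.writeLE sp 8 r1).writeLE (g + 24) 8 0) :=
    Mem.SameExcept.writeLE _ _ (g + 24) 8 0 (by omega) ⟨_, List.mem_cons_self, Nat.le_refl _, Nat.le_refl _⟩
  refine ⟨hinv1.writeLE_live hok1.gif_live (g + 24) 8 0 (by omega) (by omega), ⟨hok1.owns, ?_⟩, ?_⟩
  · -- the shape: the field holds 0, the forest's `scm` is `none`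
    have hm : MapAt none (GifFileType.SColorMap ((mem.writeLE sp 8 r1).writeLE (g + 24) 8 0) F.gif)
        ((mem.writeLE sp 8 r1).writeLE (g + 24) 8 0) := by
      show GifFileType.SColorMap ((mem.writeLE sp 8 r1).writeLE (g + 24) 8 0) F.gif = 0
      simp only [gfield]
      rw [rd_writeLE_same _ (g + 24) 8 0 (F.gif + 24) e24 (by decide)]
    have hsh := hok1.shape.set_scm (hok1.owns.placed hinv1.heap) hinv1.heap hcur hs ?_ none hm
    · rw [Forest.set_scm_eq hscm] at hsh
      exact hsh
    · intro w hw
      have e := List.mem_singleton.mp hw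
      rw [e]
      right
      simp only
      omega
  · rw [← hrem, ← hrem1]
    apply rem_sameExcept hs (by omega)
    intro w hw
    have e := List.mem_singleton.mp hw
    rw [e]
    simp only
    omega

/-- **108152H … 108211H | 1080F7H** (dgif_lib.c:272-277, 301, 309): THE WALK OF THE WHOLE SEGMENT. `r13d = Buf[0]`; the checked
stores of `SColorResolution`, `SBackGroundColor`, `AspectByte` (scalar fields of gif); `r12d = (Buf[0] & 7) + 1`. Bit 7 of `Buf[0]`
set (`js` at 1081B3H): `AtMake` at 108211H. Clear: the checked store `SColorMap = NULL`, `r12d = 1`, `jmp` to the epilogue: `Done`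
with the entry's heap and forest. -/
theorem sd3_seg (Lay : Layout) (hLay : Lay.hi = 0x1000000) (μ : Microarch) (hμ : UserX.MicroOK μ) (u₀ : State)
    (hcode : HasCodeNat Lay u₀ Gif.L.DGifGetScreenDesc.entry Gif.Code.code_DGifGetScreenDesc.nat Gif.L.DGifGetScreenDesc.size)
    (h_asan_store4_noabort : Asan.SmallCheck Lay μ ProgX.Base.WayInv (ProgX.Base.CodeOK u₀) [.rax, .rcx, .rdx] 4
      ProgX.Base.L.__asan_store4_noabort.entry)
    (h_asan_store1_noabort : Asan.SmallCheck Lay μ ProgX.Base.WayInv (ProgX.Base.CodeOK u₀) [.rax, .rdx] 1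
      ProgX.Base.L.__asan_store1_noabort.entry)
    (h_asan_store8_noabort : Asan.SmallCheck Lay μ ProgX.Base.WayInv (ProgX.Base.CodeOK u₀) [.rax, .rcx, .rdx] 8
      ProgX.Base.L.__asan_store8_noabort.entry)
    (H : Heap) (rest : List Obj) (frames : List (Nat × FrameLayout)) (F : Forest) (R : Rd) (e : State) (ret : Word)
    (v : State) (hat : DGifGetScreenDesc.Body Gif.L.DGifGetScreenDesc.at_108152 H rest frames F R u₀ e ret v) :
    ReachVia Lay μ ProgX.Base.WayInv v (fun w =>
      DGifGetScreenDesc.AtMake H rest frames F R u₀ e ret w ∨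
      DGifGetScreenDesc.Exit H rest frames F R u₀ e ret w) := by
  -- THE PRELUDE: the entry assertion `Body` = `Core` + the heap's invariant + the state invariant
  obtain ⟨hbody, hinv, hok⟩ := hat
  have he := hbody.entry
  v_entry he
  obtain ⟨henv, hrdi, hscm⟩ := hbody.pre
  -- what the walker reads of a segment's entry state: rip, rsp and rbx (as `c_…`), the registers kept, the text, DF / MXCSR
  have w_rip := hbody.rip
  have c_rsp : v.reg .rsp = e.reg .rsp - 120 := hbody.rsp
  have c_rbx : v.reg .rbx = e.reg .rdi := hbody.rbx
  have w_kept : RegsKept [.rsp] v v := RegsKept.refl _ _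
  have w_eq : Mem.EqOn ProgX.Base.L.textLo ProgX.Base.L.textHi u₀.mem v.mem := ProgX.Base.conv_code_eqOn hbody.code
  have hdf := (show abiInv _ from hbody.abi).1
  have hmx := (show abiInv _ from hbody.abi).2
  have hsse := ProgX.Base.sseOK_of_abiInv hbody.abi
  -- where the cursor and gif are, as numbers
  have hcur := henv.ctx.cursor_range henv.heap.inv.shadow
  have hgin := henv.ok.owns.inside henv.heap.inv.heap (o := (F.gif, 120)) List.mem_cons_self
  have hbase := henv.heap.base
  simp only at hgin
  rw [hbase] at hgin
  -- gif is live under the body's frames: what the four check goals ask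
  have hgl : LiveIn (H.liveObjs ++ rest) (DGifGetScreenDesc.framesIn frames e) F.gif 120 :=
    hok.gif_live.liveIn rest _ (Nat.le_refl _) (Nat.le_refl _)
  -- THE WALK, both arms of the `js`, to the two exits
  u_walk hcode [hμ.vendor] until [Gif.L.DGifGetScreenDesc.at_108211, Gif.L.DGifGetScreenDesc.at_1080f7]
    span [ProgX.Base.L.textLo, ProgX.Base.L.textHi] side (v_side)
  case check_10816b =>
    -- dgif_lib.c:272 the store of `SColorResolution`: 4 bytes at gif + 8
    have hun : ShadowUntouched v.mem s_10816b.mem := by v_untouched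
    exact hgl.accSmall hinv.shadow hun _ 4 (by decide) (by u_omega) (by u_omega)
  case check_108194 =>
    -- dgif_lib.c:275 the store of `SBackGroundColor`: 4 bytes at gif + 12
    have hun : ShadowUntouched v.mem s_108194.mem := by v_untouched
    exact hgl.accSmall hinv.shadow hun _ 4 (by decide) (by u_omega) (by u_omega)
  case check_1081a7 =>
    -- dgif_lib.c:276 the store of `AspectByte`: 1 byte at gif + 16
    have hun : ShadowUntouched v.mem s_1081a7.mem := by v_untouched
    exact hgl.accSmall hinv.shadow hun _ 1 (by decide) (by u_omega) (by u_omega)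
  case check_1081b9 =>
    -- dgif_lib.c:301 the store of `SColorMap = NULL`: 8 bytes at gif + 24
    have hun : ShadowUntouched v.mem s_1081b9.mem := by v_untouched
    exact hgl.accSmall hinv.shadow hun _ 8 (by decide) (by u_omega) (by u_omega)
  · -- 0x108211 FROM THE `js` AT 0x1081b3: bit 7 of `Buf[0]` is set, on to GifMakeMapObject
    -- the six stores since `v`
    have h3 : HeapInv H rest (DGifGetScreenDesc.framesIn frames e) ((e.reg .rsp).toNat - 120) s_1081b3.mem ∧
        GifOK H F R s_1081b3.mem ∧ Gif.Spec.rem R s_1081b3.mem = Gif.Spec.rem R v.mem := by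
      rw [w_mem]
      exact sd3_flags_stored hinv hok ⟨hcur.1, hcur.2.1⟩ hbase (e.reg .rsp - 128) (e.reg .rdi) (by u_omega) (by u_omega) hrdi
        (by omega) _ _ _ _ _ _
    obtain ⟨hinvA, hokA, hremA⟩ := h3
    have hs : Mem.SameExcept [⟨(e.reg .rsp).toNat - 400, (e.reg .rsp).toNat - 120⟩, ⟨F.gif, F.gif + 32⟩] v.mem
        s_1081b3.mem := by
      rw [w_mem]
      u_same
    have habi : (conv u₀).inv s_1081b3 := by
      refine ProgX.Base.abiInv_of ?_ ?_
      · rw [w_flags]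
        simp only [X86.User.df_setStatus]
        exact w_df_1081a7
      · rw [w_mxcsr]
        exact hmx
    have hcore : DGifGetScreenDesc.Core Gif.L.DGifGetScreenDesc.at_108211 H rest frames F R u₀ e ret s_1081b3 :=
      sd3_core_carry hbody w_rip w_rsp (w_kept.get .rbx rfl) (w_kept.get .rbp rfl) w_eq habi (by omega) (by omega) hs hremA
    refine ReachVia.done (Or.inl ?_)
    exact {
      body := ⟨hcore, hinvA, hokA⟩
      bpp_lo := by
        rw [w_r12]
        exact (sd3_bpp_range _).1
      bpp_hi := by
        rw [w_r12]
        exact (sd3_bpp_range _).2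
    }
  · -- 0x1080f7 FROM THE `jmp` AT 0x1081cc: no global colour map, `SColorMap = NULL`, GIF_OK
    -- the eight stores since `v`: the six of l.272-276, then the check call's return address and `SColorMap = NULL`
    have h4 : HeapInv H rest (DGifGetScreenDesc.framesIn frames e) ((e.reg .rsp).toNat - 120) s_1081cc.mem ∧
        GifOK H F R s_1081cc.mem ∧ Gif.Spec.rem R s_1081cc.mem = Gif.Spec.rem R v.mem := by
      rw [w_mem]
      refine sd3_scm_null_stored ?_ ⟨hcur.1, hcur.2.1⟩ hscm (e.reg .rsp - 128) (e.reg .rdi) (by u_omega) (by u_omega) hrdi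
        (by omega) (by omega) _
      exact sd3_flags_stored hinv hok ⟨hcur.1, hcur.2.1⟩ hbase (e.reg .rsp - 128) (e.reg .rdi) (by u_omega) (by u_omega) hrdi
        (by omega) _ _ _ _ _ _
    obtain ⟨hinvB, hokB, hremB⟩ := h4
    have hs : Mem.SameExcept [⟨(e.reg .rsp).toNat - 400, (e.reg .rsp).toNat - 120⟩, ⟨F.gif, F.gif + 32⟩] v.mem
        s_1081cc.mem := by
      rw [w_mem]
      u_same
    have habi : (conv u₀).inv s_1081cc := by
      refine ProgX.Base.abiInv_of ?_ ?_
      · rw [w_flags]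
        exact w_df_1081b9
      · rw [w_mxcsr]
        exact hmx
    have hcore : DGifGetScreenDesc.Core Gif.L.DGifGetScreenDesc.at_1080f7 H rest frames F R u₀ e ret s_1081cc :=
      sd3_core_carry hbody w_rip w_rsp (w_kept.get .rbx rfl) (w_kept.get .rbp rfl) w_eq habi (by omega) (by omega) hs hremB
    -- the exit to the epilogue, with the entry's heap and forest
    refine ReachVia.done (Or.inr ⟨H, F, ?_⟩)
    exact {
      core := hcore
      region := ⟨rfl, rfl⟩
      sameBut := Forest.SameButScm.refl F
      inv := hinvB
      ok := hokB
      res := by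
        left
        rw [w_r12]
        decide
      err := by
        intro _
        exact hscm
    }

end Gif.Spec.DGifGetScreenDesc_3
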